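-- pv_equiv track=rewrite | github.com/hexiaoweiff8/MyLeetCode | code/NC1031.py | check
-- ===== SOURCE A (Python) =====
-- def check(nums, firstLen, secondLen):
--     sumL = 0
--     for index in range(0, firstLen):
--         sumL += nums[index]
--     maxSumL = sumL
--     sumR = 0
--     for index in range(firstLen, firstLen + secondLen):
--         sumR += nums[index]
--     ret = maxSumL + sumR
--     index2 = firstLen
--     for index in range(firstLen + secondLen, len(nums)):
--         sumL += nums[index2] - nums[index2 - firstLen]
--         maxSumL = max(maxSumL, sumL)
--         sumR += nums[index] - nums[index - secondLen]
--         ret = max(ret, maxSumL + sumR)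
--         index2 += 1
--     return ret
-- ===== SOURCE B (Python) =====
-- def check(nums, firstLen, secondLen):
--     # Prefix-sum decomposition: any window sum is a difference of two prefix sums.
--     prefix = [0]
--     total = 0
--     for x in nums:
--         total += x
--         prefix.append(total)
--     n = len(nums)
--     bestL = prefix[firstLen]
--     best = bestL + prefix[firstLen + secondLen] - prefix[firstLen]
--     for b in range(firstLen + 1, n - secondLen + 1):
--         bestL = max(bestL, prefix[b] - prefix[b - firstLen])
--         best = max(best, bestL + prefix[b + secondLen] - prefix[b])
--     return best
-- ===== Notes on version B (the rewrite author's own statement) =====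
-- stated objective: alternative
-- what changed: B replaces A's three sliding-window accumulators over the raw array by a prefix-sum array built once, so every window sum is a difference of two prefix sums and the loop keeps only the running best left window and the running answer.
-- outside the precondition, e.g. on check([1, 2, 3], -1, 2): A returns 7, B returns 11
import Mathlib
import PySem

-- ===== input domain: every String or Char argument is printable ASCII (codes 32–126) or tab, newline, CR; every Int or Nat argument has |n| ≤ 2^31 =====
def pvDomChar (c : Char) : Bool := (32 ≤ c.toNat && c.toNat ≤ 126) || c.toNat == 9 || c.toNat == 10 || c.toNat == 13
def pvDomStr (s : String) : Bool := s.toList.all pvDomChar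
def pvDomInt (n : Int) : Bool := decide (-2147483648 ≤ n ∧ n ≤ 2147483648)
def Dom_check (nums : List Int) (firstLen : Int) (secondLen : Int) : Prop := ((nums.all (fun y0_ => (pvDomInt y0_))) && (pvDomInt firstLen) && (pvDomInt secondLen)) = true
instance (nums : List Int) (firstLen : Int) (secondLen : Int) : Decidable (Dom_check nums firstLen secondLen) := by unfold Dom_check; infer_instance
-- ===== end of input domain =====

-- B computes the same answer via a prefix-sum array (window sums become prefix differences)
-- instead of A's three sliding accumulators; same O(n) cost, different decomposition.

-- ===== PORT A =====
-- loop body of A's third for-loop; state = (sumL, maxSumL, sumR, ret, index2)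
def checkStep (nums : List Int) (firstLen : Int) (secondLen : Int)
    (st : Int × Int × Int × Int × Int) (index : Int) : Int × Int × Int × Int × Int :=
  match st with
  | (sumL, maxSumL, sumR, ret, index2) =>
    let sumL := sumL + PySem.List.pyGetD nums index2 0 - PySem.List.pyGetD nums (index2 - firstLen) 0
    let maxSumL := max maxSumL sumL
    let sumR := sumR + PySem.List.pyGetD nums index 0 - PySem.List.pyGetD nums (index - secondLen) 0
    let ret := max ret (maxSumL + sumR)
    (sumL, maxSumL, sumR, ret, index2 + 1)

def check (nums : List Int) (firstLen : Int) (secondLen : Int) : Int :=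
  let sumL := (PySem.List.pyRange 0 firstLen 1).foldl
    (fun s index => s + PySem.List.pyGetD nums index 0) 0
  let maxSumL := sumL
  let sumR := (PySem.List.pyRange firstLen (firstLen + secondLen) 1).foldl
    (fun s index => s + PySem.List.pyGetD nums index 0) 0
  let ret := maxSumL + sumR
  let fin := (PySem.List.pyRange (firstLen + secondLen) (nums.length : Int) 1).foldl
    (checkStep nums firstLen secondLen) (sumL, maxSumL, sumR, ret, firstLen)
  fin.2.2.2.1

-- ===== PORT B =====
-- loop body of B's for-loop; state = (bestL, best)
def altStep (pre : List Int) (firstLen : Int) (secondLen : Int)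
    (st : Int × Int) (b : Int) : Int × Int :=
  match st with
  | (bestL, best) =>
    let bestL := max bestL (PySem.List.pyGetD pre b 0 - PySem.List.pyGetD pre (b - firstLen) 0)
    (bestL, max best (bestL + PySem.List.pyGetD pre (b + secondLen) 0 - PySem.List.pyGetD pre b 0))

def check_alt (nums : List Int) (firstLen : Int) (secondLen : Int) : Int :=
  let pt := nums.foldl (fun (pt : List Int × Int) x => (pt.1 ++ [pt.2 + x], pt.2 + x)) ([0], 0)
  let pre := pt.1
  let n : Int := nums.length
  let bestL := PySem.List.pyGetD pre firstLen 0
  let best := bestL + PySem.List.pyGetD pre (firstLen + secondLen) 0 - PySem.List.pyGetD pre firstLen 0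
  let fin := (PySem.List.pyRange (firstLen + 1) (n - secondLen + 1) 1).foldl
    (altStep pre firstLen secondLen) (bestL, best)
  fin.2

-- ===== PRECONDITION & SPEC =====
-- Pre_ restricts to the problem's natural domain (two non-negative window lengths that fit in
-- the list): outside it A either raises IndexError (list shorter than firstLen + secondLen) or
-- its value is an accident of Python negative-index wraparound for negative window lengths.
def Pre_check (nums : List Int) (firstLen : Int) (secondLen : Int) : Prop :=
  0 ≤ firstLen ∧ 0 ≤ secondLen ∧ firstLen + secondLen ≤ (nums.length : Int)
instance (nums : List Int) (firstLen : Int) (secondLen : Int) : Decidable (Pre_check nums firstLen secondLen) := by unfold Pre_check; infer_instance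

def pvWitness_check : List Int × Int × Int := ([3, -1, 4, 1, 5], 2, 1)

def Spec_check (nums : List Int) (firstLen : Int) (secondLen : Int) (out : Int) : Prop := out = check_alt nums firstLen secondLen
instance (nums : List Int) (firstLen : Int) (secondLen : Int) (out : Int) : Decidable (Spec_check nums firstLen secondLen out) := by unfold Spec_check; infer_instance

-- ===== CLAIM (what is proved, stated in full; the proofs are below) =====
def Claim_equal_check : Prop := ∀ (nums : List Int) (firstLen : Int) (secondLen : Int), Dom_check nums firstLen secondLen → Pre_check nums firstLen secondLen → Spec_check nums firstLen secondLen (check nums firstLen secondLen)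

-- ===== LEMMAS AND PROOFS =====

-- sum of the first k elements
def pvS (nums : List Int) (k : Nat) : Int := (nums.take k).sum
-- prefix sum at an Int index
def pvPI (nums : List Int) (i : Int) : Int := pvS nums i.toNat

lemma pvS_succ (nums : List Int) (k : Nat) (h : k < nums.length) :
    pvS nums (k + 1) = pvS nums k + nums[k] := by
  unfold pvS; exact List.sum_take_succ nums k h

lemma get_eq (nums : List Int) (j : Int) (h0 : 0 ≤ j) (h1 : j < (nums.length : Int)) :
    PySem.List.pyGetD nums j 0 = pvPI nums (j + 1) - pvPI nums j := by
  rw [PySem.List.pyGetD_eq_getElem _ _ h0 h1]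
  have hj : j.toNat < nums.length := by omega
  have : (j + 1).toNat = j.toNat + 1 := by omega
  rw [pvPI, pvPI, this, pvS_succ nums j.toNat hj]
  ring

lemma prefixFold (nums : List Int) :
    nums.foldl (fun (pt : List Int × Int) x => (pt.1 ++ [pt.2 + x], pt.2 + x)) ([0], 0)
      = ((List.range (nums.length + 1)).map (pvS nums), nums.sum) := by
  induction nums using List.reverseRecOn with
  | nil => simp [pvS]
  | append_singleton ys x ih =>
    rw [List.foldl_append]
    have hmap : (List.range (ys.length + 1)).map (pvS (ys ++ [x]))
        = (List.range (ys.length + 1)).map (pvS ys) := by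
      apply List.map_congr_left
      intro k hk
      simp only [List.mem_range] at hk
      simp [pvS, List.take_append_of_le_length (by omega : k ≤ ys.length)]
    have hlast : pvS (ys ++ [x]) (ys.length + 1) = ys.sum + x := by
      unfold pvS
      rw [List.take_append, List.take_of_length_le (by omega)]
      simp
    rw [ih, List.foldl_cons, List.foldl_nil]
    have hr : List.range (ys.length + 1 + 1) = List.range (ys.length + 1) ++ [ys.length + 1] :=
      List.range_succ
    rw [List.length_append, List.length_singleton, hr, List.map_append, hmap]
    simp [hlast]

lemma preGet (nums : List Int) (i : Int) (h0 : 0 ≤ i) (h1 : i ≤ (nums.length : Int)) :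
    PySem.List.pyGetD ((List.range (nums.length + 1)).map (pvS nums)) i 0 = pvPI nums i := by
  have hlen : ((List.range (nums.length + 1)).map (pvS nums)).length = nums.length + 1 := by simp
  have h1' : i < (((List.range (nums.length + 1)).map (pvS nums)).length : Int) := by
    rw [hlen]; push_cast; omega
  rw [PySem.List.pyGetD_eq_getElem _ _ h0 h1']
  have hi : i.toNat < nums.length + 1 := by omega
  rw [List.getElem_map, List.getElem_range]
  rfl


lemma sum_range (nums : List Int) :
    ∀ (k : Nat) (a c : Int), 0 ≤ a → a + k ≤ (nums.length : Int) →
    (PySem.List.pyRange a (a + k) 1).foldl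
      (fun s index => s + PySem.List.pyGetD nums index 0) c
      = c + pvPI nums (a + k) - pvPI nums a := by
  intro k
  induction k with
  | zero =>
    intro a c _ _
    rw [PySem.List.pyRange_one_eq_nil (by omega)]
    simp
  | succ m ih =>
    intro a c h0 h1
    rw [PySem.List.pyRange_one_cons (by omega)]
    simp only [List.foldl_cons]
    have h2 : (a + 1) + (m : Int) = a + ((m : Nat) + 1 : Nat) := by push_cast; ring
    have := ih (a + 1) (c + PySem.List.pyGetD nums a 0) (by omega) (by push_cast at h1 ⊢; omega)
    rw [h2] at this
    rw [this, get_eq nums a h0 (by push_cast at h1 ⊢; omega)]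
    ring

lemma pvPI_congr (nums : List Int) {i j : Int} (h : i = j) : pvPI nums i = pvPI nums j := by rw [h]

lemma loop_eq (nums : List Int) (F S : Int) (hF : 0 ≤ F) (hS : 0 ≤ S) :
    ∀ (k : Nat) (i maxSumL ret : Int), F + S ≤ i → i + k = (nums.length : Int) →
    ((PySem.List.pyRange i (nums.length : Int) 1).foldl (checkStep nums F S)
      (pvPI nums (i - S) - pvPI nums (i - S - F), maxSumL,
       pvPI nums i - pvPI nums (i - S), ret, i - S)).2.2.2.1
    = ((PySem.List.pyRange (i - S + 1) ((nums.length : Int) - S + 1) 1).foldl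
        (altStep ((List.range (nums.length + 1)).map (pvS nums)) F S) (maxSumL, ret)).2 := by
  intro k
  induction k with
  | zero =>
    intro i maxSumL ret hge heq
    rw [PySem.List.pyRange_one_eq_nil (by omega), PySem.List.pyRange_one_eq_nil (by omega)]
    simp
  | succ m ih =>
    intro i maxSumL ret hge heq
    have hn : i < (nums.length : Int) := by omega
    rw [PySem.List.pyRange_one_cons hn,
        show PySem.List.pyRange (i - S + 1) ((nums.length : Int) - S + 1) 1
          = (i - S + 1) :: PySem.List.pyRange (i - S + 1 + 1) ((nums.length : Int) - S + 1) 1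
          from PySem.List.pyRange_one_cons (by omega)]
    simp only [List.foldl_cons, checkStep, altStep]
    -- rewrite the element accesses as prefix differences
    rw [get_eq nums (i - S) (by omega) (by omega),
        get_eq nums (i - S - F) (by omega) (by omega),
        get_eq nums i (by omega) hn]
    rw [preGet nums (i - S + 1) (by omega) (by omega),
        preGet nums (i - S + 1 - F) (by omega) (by omega),
        preGet nums (i - S + 1 + S) (by omega) (by omega)]
    -- align the prefix indices
    rw [show i - S + 1 = i + 1 - S from by ring]
    rw [pvPI_congr nums (show i - S - F + 1 = i + 1 - S - F from by ring),
        pvPI_congr nums (show i + 1 - S + S = i + 1 from by ring)]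
    have hstep := ih (i + 1)
      (max maxSumL (pvPI nums (i + 1 - S) - pvPI nums (i + 1 - S - F)))
      (max ret (max maxSumL (pvPI nums (i + 1 - S) - pvPI nums (i + 1 - S - F))
        + (pvPI nums (i + 1) - pvPI nums (i + 1 - S))))
      (by omega) (by omega)
    ring_nf
    ring_nf at hstep
    exact hstep

-- ===== VERDICT (by name: the statement is the Claim_ definition above) =====
theorem check_spec : Claim_equal_check := by
  intro nums F S _ hpre
  obtain ⟨hF, hS, hlen⟩ := hpre
  unfold Spec_check check check_alt
  simp only [prefixFold]
  -- initial sums of A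
  have hsumL : (PySem.List.pyRange 0 F 1).foldl
      (fun s index => s + PySem.List.pyGetD nums index 0) 0 = pvPI nums F := by
    have := sum_range nums F.toNat 0 0 (le_refl 0) (by omega)
    rw [show (0 : Int) + (F.toNat : Int) = F by omega] at this
    rw [this]
    simp [pvPI, pvS]
  have hsumR : (PySem.List.pyRange F (F + S) 1).foldl
      (fun s index => s + PySem.List.pyGetD nums index 0) 0
      = pvPI nums (F + S) - pvPI nums F := by
    have := sum_range nums S.toNat F 0 (by omega) (by omega)
    rw [show F + (S.toNat : Int) = F + S by omega] at this
    rw [this]; ring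
  rw [hsumL, hsumR]
  -- initial values of B
  rw [preGet nums F (by omega) (by omega), preGet nums (F + S) (by omega) (by omega)]
  have hinit := loop_eq nums F S hF hS ((nums.length : Int) - (F + S)).toNat (F + S)
    (pvPI nums F) (pvPI nums F + (pvPI nums (F + S) - pvPI nums F))
    (le_refl _) (by omega)
  rw [pvPI_congr nums (show F + S - S = F from by ring),
      pvPI_congr nums (show F + S - S - F = 0 from by ring),
      show pvPI nums 0 = 0 from by simp [pvPI, pvS]] at hinit
  ring_nf
  ring_nf at hinit
  rw [show pvPI nums (F + S) - pvPI nums F = -pvPI nums F + pvPI nums (F + S) from by ring]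
  exact hinit
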